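-- pv_equiv track=rewrite | github.com/bob686868/Leetcode-100-day-challenge- | day30.py | minOpsToMakeUniValued
-- ===== SOURCE A (Python) =====
-- def minOpsToMakeUniValued(grid,x):
--     sortedArr=[]
--     for i in range(len(grid)):
--         for j in range(len(grid[0])):
--             sortedArr.append(grid[i][j])
--
--     sortedArr.sort()
--     res=0
--     target=sortedArr[len(sortedArr)//2]
--     for n in sortedArr:
--         diff=abs(target-n)
--         if diff%x:
--             return -1
--         res+=diff//x
--     return res
-- ===== SOURCE B (Python) =====
-- def minOpsToMakeUniValued(grid, x):
--     cols = len(grid[0])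
--     flat = [row[j] for row in grid for j in range(cols)]
--     r = flat[0] % x
--     for v in flat:
--         if v % x != r:
--             return -1
--     m = _kthSmallest(flat, len(flat) // 2)
--     return sum(abs(m - v) for v in flat) // x
--
-- def _kthSmallest(xs, k):
--     # iterative quickselect, middle-element pivot, three-way partition
--     while True:
--         p = xs[len(xs) // 2]
--         lo = [v for v in xs if v < p]
--         eq = [v for v in xs if v == p]
--         if k < len(lo):
--             xs = lo
--         elif k < len(lo) + len(eq):
--             return p
--         else:
--             xs = [v for v in xs if v > p]
--             k -= len(lo) + len(eq)
-- ===== Notes on version B (the rewrite author's own statement) =====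
-- stated objective: faster
-- what changed: B replaces the full sort plus per-element modulus/division loop by a one-pass residue-class check, an iterative three-way quickselect for the median, and a single division of the summed absolute differences.
import Mathlib
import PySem

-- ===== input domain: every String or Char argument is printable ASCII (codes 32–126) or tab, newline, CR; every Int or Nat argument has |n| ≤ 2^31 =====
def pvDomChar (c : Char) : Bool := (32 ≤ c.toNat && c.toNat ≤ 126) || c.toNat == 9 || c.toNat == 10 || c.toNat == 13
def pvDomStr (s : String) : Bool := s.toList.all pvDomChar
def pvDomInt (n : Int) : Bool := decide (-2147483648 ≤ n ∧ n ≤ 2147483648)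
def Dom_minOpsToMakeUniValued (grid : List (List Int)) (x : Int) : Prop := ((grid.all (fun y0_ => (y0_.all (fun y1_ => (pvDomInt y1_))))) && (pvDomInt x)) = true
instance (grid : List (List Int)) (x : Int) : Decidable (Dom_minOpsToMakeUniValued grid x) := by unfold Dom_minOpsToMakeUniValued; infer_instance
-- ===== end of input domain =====

-- B computes the same answer with a one-pass residue check, an iterative three-way quickselect
-- for the median, and one division of the summed absolute differences, instead of A's full sort
-- and per-element modulus/division loop (different algorithm; a timing run measured B faster).


-- ===== PORT A =====
-- for n in sortedArr: diff = abs(target-n); if diff % x: return -1; res += diff // x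
def minOpsLoopA (target x : Int) : List Int → Int → Int
  | [], res => res
  | n :: rest, res =>
    let diff := |target - n|
    if PySem.Int.mod diff x ≠ 0 then -1
    else minOpsLoopA target x rest (res + PySem.Int.floordiv diff x)

def minOpsToMakeUniValued (grid : List (List Int)) (x : Int) : Int :=
  let gathered :=
    (PySem.List.pyRange 0 (grid.length : Int) 1).foldl (fun acc i =>
      (PySem.List.pyRange 0 ((PySem.List.pyGetD grid 0 []).length : Int) 1).foldl (fun acc2 j =>
        acc2 ++ [PySem.List.pyGetD (PySem.List.pyGetD grid i []) j 0]) acc) []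
  let sortedArr := PySem.List.sorted gathered (fun v => v) false
  let target := PySem.List.pyGetD sortedArr (PySem.Int.floordiv (sortedArr.length : Int) 2) 0
  minOpsLoopA target x sortedArr 0

-- ===== PORT B =====
-- the while-loop of _kthSmallest (iterative quickselect, middle pivot, three-way partition);
-- the fuel argument only makes the loop total: it is xs.length at the call site and is never
-- exhausted on admitted inputs
def kthSmallest : Nat → List Int → Int → Int
  | 0, _, _ => 0
  | fuel + 1, xs, k =>
    let p := PySem.List.pyGetD xs (PySem.Int.floordiv (xs.length : Int) 2) 0
    let lo := xs.filter (fun v => decide (v < p))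
    let eqs := xs.filter (fun v => v == p)
    if k < (lo.length : Int) then kthSmallest fuel lo k
    else if k < (lo.length : Int) + (eqs.length : Int) then p
    else kthSmallest fuel (xs.filter (fun v => decide (p < v))) (k - (lo.length : Int) - (eqs.length : Int))

-- for v in flat: if v % x != r: return -1
def residClassOk (r x : Int) : List Int → Bool
  | [] => true
  | v :: rest => if PySem.Int.mod v x ≠ r then false else residClassOk r x rest

-- flat = [row[j] for row in grid for j in range(cols)] (indexing, as in Source B)
def minOpsToMakeUniValued_alt (grid : List (List Int)) (x : Int) : Int :=
  let cols := (PySem.List.pyGetD grid 0 []).length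
  let flat := grid.flatMap (fun row =>
    (PySem.List.pyRange 0 (cols : Int) 1).map (fun j => PySem.List.pyGetD row j 0))
  let r := PySem.Int.mod (PySem.List.pyGetD flat 0 0) x
  if residClassOk r x flat then
    let m := kthSmallest flat.length flat (PySem.Int.floordiv (flat.length : Int) 2)
    PySem.Int.floordiv ((flat.map (fun v => |m - v|)).sum) x
  else -1

-- ===== PRECONDITION & SPEC =====
-- Pre_ is exactly where the Python A returns: A raises ZeroDivisionError when x = 0 and
-- IndexError when the grid or its first row is empty or some row is shorter than the first row
-- (B raises the same exceptions there).
def Pre_minOpsToMakeUniValued (grid : List (List Int)) (x : Int) : Prop :=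
  x ≠ 0 ∧ grid.headD [] ≠ [] ∧ ∀ row ∈ grid, (grid.headD []).length ≤ row.length
instance (grid : List (List Int)) (x : Int) : Decidable (Pre_minOpsToMakeUniValued grid x) := by unfold Pre_minOpsToMakeUniValued; infer_instance

def pvWitness_minOpsToMakeUniValued : List (List Int) × Int := ([[1, 5], [9, 3]], 2)

def Spec_minOpsToMakeUniValued (grid : List (List Int)) (x : Int) (out : Int) : Prop := out = minOpsToMakeUniValued_alt grid x
instance (grid : List (List Int)) (x : Int) (out : Int) : Decidable (Spec_minOpsToMakeUniValued grid x out) := by unfold Spec_minOpsToMakeUniValued; infer_instance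

-- ===== CLAIM (what is proved, stated in full; the proofs are below) =====
def Claim_equal_minOpsToMakeUniValued : Prop := ∀ (grid : List (List Int)) (x : Int), Dom_minOpsToMakeUniValued grid x → Pre_minOpsToMakeUniValued grid x → Spec_minOpsToMakeUniValued grid x (minOpsToMakeUniValued grid x)

-- ===== LEMMAS AND PROOFS =====

-- Python '%' values agree exactly when the divisor divides the difference
theorem pv_mod_eq_mod_iff (x a b : Int) (hx : x ≠ 0) :
    PySem.Int.mod a x = PySem.Int.mod b x ↔ x ∣ (a - b) := by
  have ha := PySem.Int.floordiv_mul_add_mod a x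
  have hb := PySem.Int.floordiv_mul_add_mod b x
  constructor
  · intro h
    exact ⟨PySem.Int.floordiv a x - PySem.Int.floordiv b x, by linear_combination h - ha + hb⟩
  · rintro ⟨c, hc⟩
    have hd : x ∣ (PySem.Int.mod a x - PySem.Int.mod b x) :=
      ⟨c - (PySem.Int.floordiv a x - PySem.Int.floordiv b x), by linear_combination ha - hb + hc⟩
    have hbound : (PySem.Int.mod a x - PySem.Int.mod b x).natAbs < x.natAbs := by
      rcases lt_or_gt_of_ne hx with hneg | hpos
      · have h1 := PySem.Int.mod_neg_bounds a hneg
        have h2 := PySem.Int.mod_neg_bounds b hneg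
        omega
      · have h1 := PySem.Int.mod_nonneg a hpos
        have h2 := PySem.Int.mod_lt a hpos
        have h3 := PySem.Int.mod_nonneg b hpos
        have h4 := PySem.Int.mod_lt b hpos
        omega
    have := Int.eq_zero_of_dvd_of_natAbs_lt_natAbs hd hbound
    omega

theorem pv_floordiv_of_dvd (a x : Int) (hx : x ≠ 0) (h : x ∣ a) :
    PySem.Int.floordiv a x = a / x := by
  have hm : PySem.Int.mod a x = 0 := (PySem.Int.mod_eq_zero_iff_dvd a x).mpr h
  have hfd := PySem.Int.floordiv_mul_add_mod a x
  rw [hm, add_zero] at hfd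
  conv_rhs => rw [← hfd]
  rw [Int.mul_ediv_cancel _ hx]

theorem pv_sum_ediv_of_dvd (x : Int) (l : List Int) (h : ∀ v ∈ l, x ∣ v) :
    (l.map (fun v => v / x)).sum = l.sum / x := by
  induction l with
  | nil => simp
  | cons a t ih =>
    simp only [List.map_cons, List.sum_cons]
    rw [ih (fun v hv => h v (List.mem_cons_of_mem _ hv)),
      Int.add_ediv_of_dvd_left (h a (List.mem_cons_self))]

-- '[row[j] for j in range(c)]' is 'take c row' when c ≤ len(row)
theorem mapRange_take (row : List Int) (c : Nat) (h : c ≤ row.length) :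
    (PySem.List.pyRange 0 (c : Int) 1).map (fun j => PySem.List.pyGetD row j 0)
      = List.take c row := by
  apply List.ext_getElem
  · simp [PySem.List.length_pyRange_one]
    omega
  · intro i h1 h2
    have hic : i < c := by
      simpa [PySem.List.length_pyRange_one] using h1
    simp only [List.getElem_map, PySem.List.getElem_pyRange_one, zero_add,
      PySem.List.pyGetD_natCast, List.getElem_take]
    exact List.getD_eq_getElem _ _ (by omega)

-- sorted(xs) splits as sorted(below pivot) ++ (elements equal to pivot) ++ sorted(above pivot)
theorem sorted_threeway (xs : List Int) (p : Int) :
    PySem.List.sorted xs (fun v => v) false =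
      PySem.List.sorted (xs.filter (fun v => decide (v < p))) (fun v => v) false
        ++ xs.filter (fun v => v == p)
        ++ PySem.List.sorted (xs.filter (fun v => decide (p < v))) (fun v => v) false := by
  have e1 : (xs.filter (fun v => !decide (v < p))).filter (fun v => v == p)
      = xs.filter (fun v => v == p) := by
    rw [List.filter_filter]
    apply List.filter_congr
    intro v _
    by_cases h : v = p
    · simp [h]
    · simp [h]
  have e2 : (xs.filter (fun v => !decide (v < p))).filter (fun v => !(v == p))
      = xs.filter (fun v => decide (p < v)) := by
    rw [List.filter_filter]
    apply List.filter_congr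
    intro v _
    rcases lt_trichotomy v p with h | h | h
    · simp [h]
      omega
    · simp [h]
    · simp [ne_of_gt h, not_lt_of_gt h, h]
  have base : (xs.filter (fun v => decide (v < p)) ++
      (xs.filter (fun v => v == p) ++ xs.filter (fun v => decide (p < v)))).Perm xs := by
    refine List.Perm.trans ?_ (List.filter_append_perm (fun v => decide (v < p)) xs)
    refine (List.Perm.refl _).append ?_
    rw [← e1, ← e2]
    exact List.filter_append_perm _ _
  have mlo : ∀ a ∈ PySem.List.sorted (xs.filter (fun v => decide (v < p))) (fun v => v) false, a < p := by
    intro a ha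
    rw [PySem.List.mem_sorted] at ha
    simpa using (List.mem_filter.mp ha).2
  have meq : ∀ a ∈ xs.filter (fun v => v == p), a = p := by
    intro a ha
    simpa using (List.mem_filter.mp ha).2
  have mhi : ∀ a ∈ PySem.List.sorted (xs.filter (fun v => decide (p < v))) (fun v => v) false, p < a := by
    intro a ha
    rw [PySem.List.mem_sorted] at ha
    simpa using (List.mem_filter.mp ha).2
  apply PySem.List.sorted_id_eq_of_perm_of_pairwise
  · refine List.Perm.trans ?_ base
    rw [List.append_assoc]
    exact (PySem.List.sorted_perm _ _ false).append
      ((List.Perm.refl _).append (PySem.List.sorted_perm _ _ false))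
  · rw [List.append_assoc]
    refine List.pairwise_append.mpr ⟨?_, List.pairwise_append.mpr ⟨?_, ?_, ?_⟩, ?_⟩
    · simpa using PySem.List.sorted_pairwise (xs.filter (fun v => decide (v < p))) (fun v => v)
    · exact List.pairwise_of_forall_mem_list (fun a ha b hb => by rw [meq a ha, meq b hb])
    · simpa using PySem.List.sorted_pairwise (xs.filter (fun v => decide (p < v))) (fun v => v)
    · intro a ha b hb
      rw [meq a ha]
      exact le_of_lt (mhi b hb)
    · intro a ha b hb
      rcases List.mem_append.mp hb with hb | hb
      · rw [meq b hb]; exact le_of_lt (mlo a ha)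
      · exact le_of_lt (lt_trans (mlo a ha) (mhi b hb))

-- quickselect with enough fuel returns the k-th entry of the sorted list
theorem kthSmallest_correct (fuel : Nat) (xs : List Int) (k : Int)
    (hf : xs.length ≤ fuel) (h0 : 0 ≤ k) (hk : k < (xs.length : Int)) :
    kthSmallest fuel xs k = (PySem.List.sorted xs (fun v => v) false).getD k.toNat 0 := by
  induction fuel generalizing xs k with
  | zero =>
    exfalso
    have : xs.length = 0 := Nat.le_zero.mp hf
    omega
  | succ f ih =>
    have hlen0 : 0 < xs.length := by omega
    simp only [kthSmallest]
    have hmid : PySem.Int.floordiv ((xs.length : Nat) : Int) 2 = ((xs.length / 2 : Nat) : Int) := by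
      exact_mod_cast PySem.Int.floordiv_natCast xs.length 2
    have hmidlt : xs.length / 2 < xs.length := Nat.div_lt_self hlen0 (by omega)
    set p := PySem.List.pyGetD xs (PySem.Int.floordiv ((xs.length : Nat) : Int) 2) 0 with hp
    have hpval : p = xs[xs.length / 2]'hmidlt := by
      rw [hp, hmid, PySem.List.pyGetD_natCast, List.getD_eq_getElem _ _ hmidlt]
    have hpmem : p ∈ xs := hpval ▸ List.getElem_mem _
    set lo := xs.filter (fun v => decide (v < p)) with hlo
    set eqs := xs.filter (fun v => v == p) with heqs
    set hi := xs.filter (fun v => decide (p < v)) with hhi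
    have hpeqs : p ∈ eqs := List.mem_filter.mpr ⟨hpmem, by simp⟩
    have heqpos : 0 < eqs.length := List.length_pos_of_mem hpeqs
    have hkey := sorted_threeway xs p
    rw [← hlo, ← heqs, ← hhi] at hkey
    have hsum : lo.length + eqs.length + hi.length = xs.length := by
      have hlenkey := congrArg List.length hkey
      simp only [List.length_append, PySem.List.length_sorted] at hlenkey
      omega
    split_ifs with h1 h2
    · rw [ih lo k (by omega) h0 h1, hkey, List.append_assoc, List.getD_append]
      simp only [PySem.List.length_sorted]
      omega
    · symm
      rw [hkey, List.append_assoc, List.getD_append_right _ _ _ _ (by simp only [PySem.List.length_sorted]; omega)]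
      have hidx : k.toNat - (PySem.List.sorted lo (fun v => v) false).length < eqs.length := by
        simp only [PySem.List.length_sorted]
        omega
      rw [List.getD_append _ _ _ _ hidx, List.getD_eq_getElem _ _ hidx]
      have hallp : ∀ a ∈ eqs, a = p := by
        intro a ha
        rw [heqs] at ha
        simpa using (List.mem_filter.mp ha).2
      exact hallp _ (List.getElem_mem _)
    · have hk2 : 0 ≤ k - (lo.length : Int) - (eqs.length : Int) := by omega
      have hk3 : k - (lo.length : Int) - (eqs.length : Int) < (hi.length : Int) := by
        omega
      rw [ih hi _ (by omega) hk2 hk3, hkey,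
        List.getD_append_right _ _ _ _ (by simp only [List.length_append, PySem.List.length_sorted]; omega)]
      congr 1
      simp only [List.length_append, PySem.List.length_sorted]
      omega

theorem loopA_char (t x : Int) (l : List Int) (res : Int) :
    minOpsLoopA t x l res =
      if ∀ v ∈ l, PySem.Int.mod (|t - v|) x = 0 then
        res + (l.map (fun v => PySem.Int.floordiv (|t - v|) x)).sum
      else -1 := by
  induction l generalizing res with
  | nil => simp [minOpsLoopA]
  | cons n rest ih =>
    by_cases h : PySem.Int.mod (|t - n|) x = 0
    · have hstep : minOpsLoopA t x (n :: rest) res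
          = minOpsLoopA t x rest (res + PySem.Int.floordiv (|t - n|) x) := by
        simp [minOpsLoopA, h]
      have hcons : (∀ v ∈ n :: rest, PySem.Int.mod (|t - v|) x = 0)
          ↔ (∀ v ∈ rest, PySem.Int.mod (|t - v|) x = 0) := by simp [h]
      by_cases hall : ∀ v ∈ rest, PySem.Int.mod (|t - v|) x = 0
      · rw [hstep, ih, if_pos hall, if_pos (hcons.mpr hall)]
        simp only [List.map_cons, List.sum_cons]
        ring
      · rw [hstep, ih, if_neg hall, if_neg (fun hh => hall (hcons.mp hh))]
    · have hstep : minOpsLoopA t x (n :: rest) res = -1 := by simp [minOpsLoopA, h]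
      rw [hstep, if_neg (fun hh => h (hh n (by simp)))]

theorem residClassOk_iff (r x : Int) (l : List Int) :
    residClassOk r x l = true ↔ ∀ v ∈ l, PySem.Int.mod v x = r := by
  induction l with
  | nil => simp [residClassOk]
  | cons v rest ih =>
    by_cases h : PySem.Int.mod v x = r
    · simp [residClassOk, h, ih]
    · simp [residClassOk, h]

-- ===== VERDICT (by name: the statement is the Claim_ definition above) =====
theorem minOpsToMakeUniValued_spec : Claim_equal_minOpsToMakeUniValued := by
  intro grid x _ hpre
  obtain ⟨hx, hhead, hrect⟩ := hpre
  unfold Spec_minOpsToMakeUniValued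
  cases grid with
  | nil => exact absurd rfl hhead
  | cons g0 rest =>
    simp only [List.headD_cons] at hhead hrect
    -- A gathers, row by row, the first g0.length entries of each row
    have hinner : ∀ row ∈ (g0 :: rest), ∀ acc : List Int,
        (PySem.List.pyRange 0 ((g0.length : Nat) : Int) 1).foldl
          (fun acc2 j => acc2 ++ [PySem.List.pyGetD row j 0]) acc
          = acc ++ List.take g0.length row := by
      intro row hrow acc
      have hcle : g0.length ≤ row.length := hrect row hrow
      have hlt : (List.take g0.length row).length = g0.length := by
        simp [List.length_take]
        omega
      have hcongr : ∀ acc2 : List Int, ∀ j ∈ PySem.List.pyRange 0 ((g0.length : Nat) : Int) 1,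
          acc2 ++ [PySem.List.pyGetD row j 0]
            = acc2 ++ [PySem.List.pyGetD (List.take g0.length row) j 0] := by
        intro acc2 j hj
        rw [PySem.List.mem_pyRange_one] at hj
        rw [PySem.List.pyGetD_eq_getElem row 0 hj.1 (by have := hj.2; omega),
          PySem.List.pyGetD_eq_getElem (List.take g0.length row) 0 hj.1
            (by rw [hlt]; exact hj.2),
          List.getElem_take]
      rw [PySem.List.foldl_congr_mem (PySem.List.pyRange 0 ((g0.length : Nat) : Int) 1) _
        (fun acc2 j => acc2 ++ [PySem.List.pyGetD (List.take g0.length row) j 0]) acc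
        (fun acc2 j hj => hcongr acc2 j hj)]
      rw [show ((g0.length : Nat) : Int) = (((List.take g0.length row).length : Nat) : Int) from
        by rw [hlt]]
      exact (PySem.List.foldl_pyRange_zero_pyGetD' (List.take g0.length row) 0
        (fun acc2 v => acc2 ++ [v]) acc).trans
        (PySem.List.foldl_append_singleton_eq_self _ acc)
    have hgather : (PySem.List.pyRange 0 (((g0 :: rest).length : Nat) : Int) 1).foldl
        (fun acc i => (PySem.List.pyRange 0 ((g0.length : Nat) : Int) 1).foldl
          (fun acc2 j => acc2 ++ [PySem.List.pyGetD (PySem.List.pyGetD (g0 :: rest) i []) j 0]) acc) []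
        = (g0 :: rest).flatMap (fun row => List.take g0.length row) := by
      refine (PySem.List.foldl_pyRange_zero_pyGetD' (g0 :: rest) []
        (fun acc row => (PySem.List.pyRange 0 ((g0.length : Nat) : Int) 1).foldl
          (fun acc2 j => acc2 ++ [PySem.List.pyGetD row j 0]) acc) []).trans ?_
      rw [PySem.List.foldl_congr_mem (g0 :: rest) _
        (fun acc row => acc ++ List.take g0.length row) []
        (fun acc row hrow => hinner row hrow acc)]
      simpa using PySem.List.foldl_append_eq_flatMap (fun row => List.take g0.length row) (g0 :: rest) []
    -- B's comprehension reads the same first g0.length entries of each row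
    have hflatB : (g0 :: rest).flatMap (fun row =>
        (PySem.List.pyRange 0 ((g0.length : Nat) : Int) 1).map (fun j => PySem.List.pyGetD row j 0))
        = (g0 :: rest).flatMap (fun row => List.take g0.length row) :=
      List.flatMap_congr (fun row hrow => mapRange_take row g0.length (hrect row hrow))
    simp only [minOpsToMakeUniValued, minOpsToMakeUniValued_alt,
      PySem.List.pyGetD_zero, List.getD_cons_zero]
    rw [hgather, hflatB]
    set flat := (g0 :: rest).flatMap (fun row => List.take g0.length row) with hflatdef
    set s := PySem.List.sorted flat (fun v => v) false with hsdef
    have hg0len : 0 < g0.length := List.length_pos_of_ne_nil hhead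
    have hn : 0 < flat.length := by
      rw [hflatdef, List.flatMap_cons, List.take_length, List.length_append]
      omega
    have hslen : s.length = flat.length := PySem.List.length_sorted flat _ false
    have hmidlt : flat.length / 2 < flat.length := Nat.div_lt_self hn (by omega)
    have hfd2 : PySem.Int.floordiv ((flat.length : Nat) : Int) 2 = ((flat.length / 2 : Nat) : Int) := by
      exact_mod_cast PySem.Int.floordiv_natCast flat.length 2
    have hTargetA : PySem.List.pyGetD s (PySem.Int.floordiv ((s.length : Nat) : Int) 2) 0
        = s.getD (flat.length / 2) 0 := by
      rw [hslen, hfd2, PySem.List.pyGetD_natCast]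
    have hmB : kthSmallest flat.length flat (PySem.Int.floordiv ((flat.length : Nat) : Int) 2)
        = s.getD (flat.length / 2) 0 := by
      rw [hfd2, kthSmallest_correct flat.length flat _ le_rfl (Int.natCast_nonneg _)
        (by exact_mod_cast hmidlt)]
      simp only [Int.toNat_natCast]
      rw [← hsdef]
    rw [hTargetA, hmB, loopA_char]
    set t := s.getD (flat.length / 2) 0 with htdef
    have hts : t ∈ s := by
      rw [htdef, List.getD_eq_getElem _ _ (by omega : flat.length / 2 < s.length)]
      exact List.getElem_mem _
    have htmem : t ∈ flat := (PySem.List.mem_sorted _ _ _ _).mp hts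
    have hf0mem : flat.getD 0 0 ∈ flat := by
      rw [List.getD_eq_getElem _ _ hn]
      exact List.getElem_mem _
    have hEquiv : (∀ v ∈ s, PySem.Int.mod (|t - v|) x = 0)
        ↔ (∀ v ∈ flat, PySem.Int.mod v x = PySem.Int.mod (flat.getD 0 0) x) := by
      constructor
      · intro h v hv
        have h2 : PySem.Int.mod t x = PySem.Int.mod v x := by
          have hh := h v ((PySem.List.mem_sorted _ _ _ _).mpr hv)
          rw [PySem.Int.mod_eq_zero_iff_dvd, dvd_abs] at hh
          exact (pv_mod_eq_mod_iff x t v hx).mpr hh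
        have h3 : PySem.Int.mod t x = PySem.Int.mod (flat.getD 0 0) x := by
          have hh := h (flat.getD 0 0) ((PySem.List.mem_sorted _ _ _ _).mpr hf0mem)
          rw [PySem.Int.mod_eq_zero_iff_dvd, dvd_abs] at hh
          exact (pv_mod_eq_mod_iff x t _ hx).mpr hh
        rw [← h2, h3]
      · intro h v hv
        have hv' : v ∈ flat := (PySem.List.mem_sorted _ _ _ _).mp hv
        rw [PySem.Int.mod_eq_zero_iff_dvd, dvd_abs]
        exact (pv_mod_eq_mod_iff x t v hx).mp (by rw [h v hv', h t htmem])
    by_cases hcond : ∀ v ∈ flat, PySem.Int.mod v x = PySem.Int.mod (flat.getD 0 0) x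
    · rw [if_pos (hEquiv.mpr hcond), if_pos ((residClassOk_iff _ _ _).mpr hcond)]
      have hdvd : ∀ v ∈ flat, x ∣ |t - v| := by
        intro v hv
        rw [dvd_abs]
        exact (pv_mod_eq_mod_iff x t v hx).mp (by rw [hcond v hv, hcond t htmem])
      have hperm : (s.map (fun v => PySem.Int.floordiv (|t - v|) x)).Perm
          (flat.map (fun v => PySem.Int.floordiv (|t - v|) x)) :=
        (PySem.List.sorted_perm flat _ false).map _
      rw [zero_add, hperm.sum_eq]
      have hmapc : flat.map (fun v => PySem.Int.floordiv (|t - v|) x)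
          = (flat.map (fun v => |t - v|)).map (fun a => a / x) := by
        rw [List.map_map]
        exact List.map_congr_left (fun v hv => pv_floordiv_of_dvd _ x hx (hdvd v hv))
      rw [hmapc, pv_sum_ediv_of_dvd x _
        (by intro w hw; rcases List.mem_map.mp hw with ⟨v, hv, rfl⟩; exact hdvd v hv)]
      rw [pv_floordiv_of_dvd _ x hx (List.dvd_sum
        (by intro w hw; rcases List.mem_map.mp hw with ⟨v, hv, rfl⟩; exact hdvd v hv))]
    · rw [if_neg (fun hh => hcond (hEquiv.mp hh)),
        if_neg (by simpa [residClassOk_iff] using hcond)]
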